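-- pv_equiv track=rewrite | github.com/maxcrave/SSC | app01/templatetags/calculate_ssc_zhongsan.py | zhongsan_regular
-- ===== SOURCE A (Python) =====
-- def zhongsan_check_in_number(item, regular):
--     check_number = item[1][1:-1]
--     for one_number in check_number:
--         if one_number in regular:
--             return True
--     return False
--
-- def zhongsan_regular(ssc_pre_number_oderdict_list, check_list=None):
--
--     if not check_list:
--         check_list = ['01234', '56789', '13579', '02468', '12357', '04689']
--     ssc_report = dict()
--     for check_regular in check_list:
--         ssc_report[check_regular] = 0
--
--     for item in ssc_pre_number_oderdict_list.items():
--
--         for check_regular in check_list: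
--             result = zhongsan_check_in_number(item, check_regular)
--             if result:
--                 ssc_report[check_regular] += 1
--
--     return ssc_report
-- ===== SOURCE B (Python) =====
-- def zhongsan_regular(ssc_pre_number_oderdict_list, check_list=None):
--     if not check_list:
--         check_list = ['01234', '56789', '13579', '02468', '12357', '04689']
--     # inverted index: digit character -> positions of the regulars containing it
--     index = {}
--     for i, regular in enumerate(check_list):
--         for ch in regular:
--             index.setdefault(ch, []).append(i)
--     report = {regular: 0 for regular in check_list}
--     for value in ssc_pre_number_oderdict_list.values():
--         matched = set()
--         for ch in value[1:-1]:
--             matched.update(index.get(ch, ()))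
--         for i in matched:
--             report[check_list[i]] += 1
--     return report
-- ===== Notes on version B (the rewrite author's own statement) =====
-- stated objective: alternative
-- what changed: B builds an inverted index from digit character to the positions of the check-list regulars containing it, then for each item unions the position lists of its middle characters into a matched set and increments the report entry of each matched position once, replacing A's nested per-item scan over the whole check list with an early-exit character test.
import Mathlib
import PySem

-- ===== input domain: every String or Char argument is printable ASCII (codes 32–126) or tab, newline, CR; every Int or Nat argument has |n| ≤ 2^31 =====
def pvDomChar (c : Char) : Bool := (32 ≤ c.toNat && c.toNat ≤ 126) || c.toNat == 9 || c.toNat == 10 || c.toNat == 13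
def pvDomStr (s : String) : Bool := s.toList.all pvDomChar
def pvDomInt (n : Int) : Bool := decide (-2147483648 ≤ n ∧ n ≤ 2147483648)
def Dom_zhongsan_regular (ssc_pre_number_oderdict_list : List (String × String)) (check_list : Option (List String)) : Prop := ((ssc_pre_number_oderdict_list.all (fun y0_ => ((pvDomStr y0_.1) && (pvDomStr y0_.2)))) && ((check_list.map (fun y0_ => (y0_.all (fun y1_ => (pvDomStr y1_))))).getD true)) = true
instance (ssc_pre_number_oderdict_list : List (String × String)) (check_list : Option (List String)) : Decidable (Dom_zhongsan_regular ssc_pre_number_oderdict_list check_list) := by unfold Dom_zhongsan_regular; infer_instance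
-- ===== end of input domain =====

-- B replaces A's per-item scan over the whole check list by an inverted index from digit
-- character to the positions of the regulars containing it, collected per item into a matched
-- set of positions (objective: alternative data structure).

-- the default check list (both Pythons spell out the same literal)
def zsDefault : List String := ["01234", "56789", "13579", "02468", "12357", "04689"]

-- ===== PORT A =====
-- 'for one_number in check_number: if one_number in regular: return True' — early-exit scan;
-- 'c in s' for a single character is exactly character membership, ported as contains on toList
def zsLoop (cs : List Char) (regular : String) : Bool :=
  match cs with
  | [] => false
  | c :: rest => if regular.toList.contains c then true else zsLoop rest regular

def zhongsan_check_in_number (item : String × String) (regular : String) : Bool :=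
  let check_number := PySem.Chars.slice item.2.toList (some 1) (some (-1))  -- item[1][1:-1]
  zsLoop check_number regular

def zhongsan_regular (ssc_pre_number_oderdict_list : List (String × String)) (check_list : Option (List String)) : List (String × Int) :=
  -- 'if not check_list' is true for None and for []
  let cl : List String := match check_list with
    | none => zsDefault
    | some l => if l = [] then zsDefault else l
  let ssc_report : PySem.Dict String Int :=
    cl.foldl (fun d check_regular => d.insert check_regular 0) PySem.Dict.empty
  let report :=
    (PySem.Dict.ofList ssc_pre_number_oderdict_list).items.foldl
      (fun d item =>
        cl.foldl (fun d check_regular =>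
            if zhongsan_check_in_number item check_regular then d.modify check_regular 0 (· + 1) else d)
          d)
      ssc_report
  report.items

-- ===== PORT B =====
-- index.setdefault(ch, []).append(i), looped over the characters of each regular, i from enumerate
def zsIndex (cl : List String) : PySem.Dict Char (List Int) :=
  (PySem.List.enumerate cl 0).foldl (fun d p =>
      p.2.toList.foldl (fun d ch => d.insert ch (d.getD ch [] ++ [p.1])) d)
    PySem.Dict.empty

-- matched = set(); for ch in value[1:-1]: matched.update(index.get(ch, ()))
def zsMatched (index : PySem.Dict Char (List Int)) (value : String) : PySem.Set Int :=
  (PySem.Chars.slice value.toList (some 1) (some (-1))).foldl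
    (fun m ch => PySem.Set.update m (index.getD ch [])) PySem.Set.empty

-- for i in matched: report[check_list[i]] += 1   (i comes from enumerate, so always in range:
-- check_list[i] is ported as pyGetD, exact for these in-range non-negative indices)
def zsBump (cl : List String) (rep : PySem.Dict String Int) (matched : PySem.Set Int) : PySem.Dict String Int :=
  matched.foldl (fun rep i => rep.modify (PySem.List.pyGetD cl i "") 0 (· + 1)) rep

def zhongsan_regular_alt (ssc_pre_number_oderdict_list : List (String × String)) (check_list : Option (List String)) : List (String × Int) :=
  let cl : List String := match check_list with
    | none => zsDefault
    | some l => if l = [] then zsDefault else l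
  let index := zsIndex cl
  let report0 : PySem.Dict String Int :=
    cl.foldl (fun d regular => d.insert regular 0) PySem.Dict.empty
  ((PySem.Dict.ofList ssc_pre_number_oderdict_list).values.foldl
      (fun rep value => zsBump cl rep (zsMatched index value)) report0).items

-- ===== PRECONDITION & SPEC =====
def Spec_zhongsan_regular (ssc_pre_number_oderdict_list : List (String × String)) (check_list : Option (List String)) (out : List (String × Int)) : Prop := out = zhongsan_regular_alt ssc_pre_number_oderdict_list check_list
instance (ssc_pre_number_oderdict_list : List (String × String)) (check_list : Option (List String)) (out : List (String × Int)) : Decidable (Spec_zhongsan_regular ssc_pre_number_oderdict_list check_list out) := by unfold Spec_zhongsan_regular; infer_instance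

-- ===== CLAIM (what is proved, stated in full; the proofs are below) =====
def Claim_equal_zhongsan_regular : Prop := ∀ (ssc_pre_number_oderdict_list : List (String × String)) (check_list : Option (List String)), Dom_zhongsan_regular ssc_pre_number_oderdict_list check_list → Spec_zhongsan_regular ssc_pre_number_oderdict_list check_list (zhongsan_regular ssc_pre_number_oderdict_list check_list)

-- ===== LEMMAS AND PROOFS =====

-- A's early-exit scan is the existential 'any'
lemma zsLoop_eq_any (cs : List Char) (regular : String) :
    zsLoop cs regular = cs.any (fun c => regular.toList.contains c) := by
  induction cs with
  | nil => rfl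
  | cons c rest ih =>
    simp only [zsLoop, List.any_cons]
    by_cases h : regular.toList.contains c = true <;> simp [h, ih]


-- every entry written by the initialisation fold is 0
lemma getD_init (l : List String) (d : PySem.Dict String Int) (k : String) (h : d.getD k 0 = 0) :
    (l.foldl (fun d r => d.insert r 0) d).getD k 0 = 0 := by
  induction l generalizing d with
  | nil => exact h
  | cons x xs ih =>
    simp only [List.foldl_cons]
    apply ih
    rw [PySem.Dict.getD_insert]
    split <;> simp [h]

-- getD through A's inner conditional-modify fold
lemma getD_inner (p : String → Bool) (l : List String) (d : PySem.Dict String Int) (k : String) :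
    (l.foldl (fun d cr => if p cr then d.modify cr 0 (· + 1) else d) d).getD k 0
      = d.getD k 0 + (if p k then (l.count k : Int) else 0) := by
  induction l generalizing d with
  | nil => simp
  | cons x xs ih =>
    simp only [List.foldl_cons]
    by_cases hx : p x = true
    · rw [if_pos hx, ih, PySem.Dict.getD_modify]
      by_cases hk : k = x
      · subst hk
        rw [if_pos rfl, if_pos hx, if_pos hx, List.count_cons_self]
        push_cast; ring
      · simp [(Ne.symm hk : x ≠ k), hk]
    · rw [if_neg hx, ih]
      by_cases hk : k = x
      · subst hk; simp [hx]
      · simp [(Ne.symm hk : x ≠ k)]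

-- keys through A's inner conditional-modify fold are unchanged when all regulars are present
lemma keys_inner (p : String → Bool) (l : List String) (d : PySem.Dict String Int)
    (h : ∀ x ∈ l, d.contains x = true) :
    (l.foldl (fun d cr => if p cr then d.modify cr 0 (· + 1) else d) d).keys = d.keys := by
  induction l generalizing d with
  | nil => rfl
  | cons x xs ih =>
    simp only [List.foldl_cons]
    have h' : ∀ y ∈ xs, (if p x then d.modify x 0 (· + 1) else d).contains y = true := by
      intro y hy
      split
      · rw [PySem.Dict.contains_modify]
        simp [h y (List.mem_cons_of_mem _ hy)]
      · exact h y (List.mem_cons_of_mem _ hy)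
    rw [ih _ h']
    split
    · rw [PySem.Dict.keys_modify, PySem.Dict.keys_insert_of_contains]
      exact h x (List.mem_cons_self ..)
    · rfl

-- contains is preserved through the inner fold
lemma contains_inner (p : String → Bool) (l : List String) (d : PySem.Dict String Int)
    (h : ∀ x ∈ l, d.contains x = true) (k : String) (hk : d.contains k = true) :
    (l.foldl (fun d cr => if p cr then d.modify cr 0 (· + 1) else d) d).contains k = true := by
  rw [PySem.Dict.contains_iff_mem_keys, keys_inner p l d h]
  exact (PySem.Dict.contains_iff_mem_keys d k).1 hk

-- getD through A's outer fold over the items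
lemma outer_getD (items : List (String × String)) (cl : List String)
    (d : PySem.Dict String Int) (k : String) (hkeys : ∀ x ∈ cl, d.contains x = true) :
    (items.foldl (fun d item =>
        cl.foldl (fun d cr => if zhongsan_check_in_number item cr then d.modify cr 0 (· + 1) else d) d)
      d).getD k 0
    = d.getD k 0 + (cl.count k : Int) * (items.countP (fun it => zhongsan_check_in_number it k) : Int) := by
  induction items generalizing d with
  | nil => simp
  | cons it its ih =>
    simp only [List.foldl_cons]
    have h' : ∀ x ∈ cl,
        (cl.foldl (fun d cr => if zhongsan_check_in_number it cr then d.modify cr 0 (· + 1) else d) d).contains x = true :=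
      fun x hx => contains_inner _ cl d hkeys x (hkeys x hx)
    rw [ih _ h', getD_inner, List.countP_cons]
    by_cases hc : zhongsan_check_in_number it k = true
    · rw [if_pos hc, if_pos hc]
      push_cast; ring
    · rw [if_neg hc, if_neg hc]
      push_cast; ring

-- keys through A's outer fold over the items
lemma outer_keys (items : List (String × String)) (cl : List String)
    (d : PySem.Dict String Int) (hkeys : ∀ x ∈ cl, d.contains x = true) :
    (items.foldl (fun d item =>
        cl.foldl (fun d cr => if zhongsan_check_in_number item cr then d.modify cr 0 (· + 1) else d) d)
      d).keys = d.keys := by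
  induction items generalizing d with
  | nil => rfl
  | cons it its ih =>
    simp only [List.foldl_cons]
    have h' : ∀ x ∈ cl,
        (cl.foldl (fun d cr => if zhongsan_check_in_number it cr then d.modify cr 0 (· + 1) else d) d).contains x = true :=
      fun x hx => contains_inner _ cl d hkeys x (hkeys x hx)
    rw [ih _ h', keys_inner _ cl d hkeys]

-- B-side: membership in one index list, inner fold over one regular's characters
lemma mem_index_inner (cs : List Char) (i : Int) (d : PySem.Dict Char (List Int))
    (ch : Char) (x : Int) :
    x ∈ (cs.foldl (fun d c => d.insert c (d.getD c [] ++ [i])) d).getD ch []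
      ↔ x ∈ d.getD ch [] ∨ (x = i ∧ ch ∈ cs) := by
  induction cs generalizing d with
  | nil => simp
  | cons c rest ih =>
    simp only [List.foldl_cons]
    rw [ih, PySem.Dict.getD_insert]
    by_cases hc : ch = c
    · subst hc; simp [eq_comm]
      tauto
    · simp [hc]

-- membership in the inverted index built from an (index, regular) list
lemma mem_index_aux (l : List (Int × String)) (d : PySem.Dict Char (List Int)) (ch : Char) (x : Int) :
    x ∈ (l.foldl (fun d p =>
          p.2.toList.foldl (fun d c => d.insert c (d.getD c [] ++ [p.1])) d) d).getD ch []
      ↔ x ∈ d.getD ch [] ∨ ∃ p ∈ l, x = p.1 ∧ ch ∈ p.2.toList := by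
  induction l generalizing d with
  | nil => simp
  | cons q rest ih =>
    simp only [List.foldl_cons]
    rw [ih, mem_index_inner]
    constructor
    · rintro (⟨h | ⟨rfl, hc⟩⟩ | ⟨p, hp, hx, hc⟩)
      · exact Or.inl h
      · exact Or.inr ⟨q, List.mem_cons_self .., rfl, hc⟩
      · exact Or.inr ⟨p, List.mem_cons_of_mem _ hp, hx, hc⟩
    · rintro (h | ⟨p, hp, hx, hc⟩)
      · exact Or.inl (Or.inl h)
      · rcases List.mem_cons.1 hp with rfl | hp'
        · exact Or.inl (Or.inr ⟨hx, hc⟩)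
        · exact Or.inr ⟨p, hp', hx, hc⟩

-- x is listed under ch iff x is the position of a regular containing ch
lemma mem_zsIndex (cl : List String) (ch : Char) (x : Int) :
    x ∈ (zsIndex cl).getD ch []
      ↔ ∃ (n : Nat) (h : n < cl.length), x = (n : Int) ∧ ch ∈ cl[n].toList := by
  unfold zsIndex
  rw [mem_index_aux]
  simp only [PySem.Dict.getD_empty, List.not_mem_nil, false_or]
  constructor
  · rintro ⟨p, hp, hx, hc⟩
    rcases (PySem.List.mem_enumerate_iff _ _ _).1 hp with ⟨n, hn, rfl⟩
    exact ⟨n, hn, by simpa using hx, hc⟩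
  · rintro ⟨n, hn, hx, hc⟩
    exact ⟨((0 : Int) + (n : Int), cl[n]'hn), (PySem.List.mem_enumerate_iff _ _ _).2 ⟨n, hn, rfl⟩,
      by simpa using hx, hc⟩

-- membership in a fold of set-updates
lemma mem_foldl_update (cs : List Char) (g : Char → List Int) (m : PySem.Set Int) (x : Int) :
    x ∈ cs.foldl (fun m ch => PySem.Set.update m (g ch)) m ↔ x ∈ m ∨ ∃ ch ∈ cs, x ∈ g ch := by
  induction cs generalizing m with
  | nil => simp
  | cons c rest ih =>
    simp only [List.foldl_cons]
    rw [ih, PySem.Set.mem_update]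
    simp only [List.mem_cons]
    constructor
    · rintro ((h | h) | ⟨ch, hc, hx⟩)
      · exact Or.inl h
      · exact Or.inr ⟨c, Or.inl rfl, h⟩
      · exact Or.inr ⟨ch, Or.inr hc, hx⟩
    · rintro (h | ⟨ch, (rfl | hc), hx⟩)
      · exact Or.inl (Or.inl h)
      · exact Or.inl (Or.inr hx)
      · exact Or.inr ⟨ch, hc, hx⟩

-- a fold of set-updates keeps the no-duplicates invariant
lemma nodup_foldl_update (cs : List Char) (g : Char → List Int) (m : PySem.Set Int)
    (hm : m.Nodup) :
    (cs.foldl (fun m ch => PySem.Set.update m (g ch)) m).Nodup := by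
  induction cs generalizing m with
  | nil => exact hm
  | cons c rest ih =>
    simp only [List.foldl_cons]
    exact ih _ (PySem.Set.nodup_update _ _ hm)

-- the matched positions of one item are exactly the positions whose regular passes A's check
lemma mem_zsMatched (cl : List String) (value : String) (x : Int) :
    x ∈ zsMatched (zsIndex cl) value
      ↔ ∃ (n : Nat) (h : n < cl.length),
          x = (n : Int) ∧ zhongsan_check_in_number ("", value) cl[n] = true := by
  unfold zsMatched zhongsan_check_in_number
  rw [mem_foldl_update]
  simp only [PySem.Set.empty, List.not_mem_nil, false_or, zsLoop_eq_any, List.any_eq_true]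
  constructor
  · rintro ⟨ch, hc, hx⟩
    rcases (mem_zsIndex cl ch x).1 hx with ⟨n, hn, rfl, hin⟩
    exact ⟨n, hn, rfl, ⟨ch, hc, by simpa using hin⟩⟩
  · rintro ⟨n, hn, rfl, ch, hc, hin⟩
    exact ⟨ch, hc, (mem_zsIndex cl ch _).2 ⟨n, hn, rfl, by simpa using hin⟩⟩

lemma nodup_zsMatched (index : PySem.Dict Char (List Int)) (value : String) :
    (zsMatched index value).Nodup :=
  nodup_foldl_update _ _ _ List.nodup_nil

-- one item's increments: each matched position bumps its regular by one
lemma getD_zsBump (cl : List String) (matched : PySem.Set Int) (hn : matched.Nodup)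
    (rep : PySem.Dict String Int) (k : String) :
    (zsBump cl rep matched).getD k 0
      = rep.getD k 0 + (matched.countP (fun i => PySem.List.pyGetD cl i "" == k) : Int) := by
  unfold zsBump
  induction matched generalizing rep with
  | nil => simp
  | cons r rest ih =>
    simp only [List.foldl_cons, List.countP_cons]
    rw [ih (List.Nodup.of_cons hn), PySem.Dict.getD_modify]
    by_cases hk : k = PySem.List.pyGetD cl r ""
    · simp only [hk, beq_self_eq_true, if_pos]
      push_cast; ring
    · simp only [if_neg hk]
      have : (PySem.List.pyGetD cl r "" == k) = false := by
        simp [Ne.symm hk]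
      simp [this]

lemma keys_zsBump (cl : List String) (matched : PySem.Set Int) (rep : PySem.Dict String Int)
    (h : ∀ i ∈ matched, PySem.List.pyGetD cl i "" ∈ rep.keys) :
    (zsBump cl rep matched).keys = rep.keys := by
  unfold zsBump
  induction matched generalizing rep with
  | nil => rfl
  | cons r rest ih =>
    simp only [List.foldl_cons]
    rw [ih]
    · rw [PySem.Dict.keys_modify, PySem.Dict.keys_insert_of_contains]
      rw [PySem.Dict.contains_iff_mem_keys]
      exact h r (List.mem_cons_self ..)
    · intro i hi
      rw [PySem.Dict.keys_modify, PySem.Dict.keys_insert_of_contains]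
      · exact h i (List.mem_cons_of_mem _ hi)
      · rw [PySem.Dict.contains_iff_mem_keys]
        exact h r (List.mem_cons_self ..)

-- one item's matched positions whose regular is k number exactly count(cl, k) when k passes
lemma countP_zsMatched (cl : List String) (value : String) (k : String) :
    (zsMatched (zsIndex cl) value).countP (fun i => PySem.List.pyGetD cl i "" == k)
      = if zhongsan_check_in_number ("", value) k then cl.count k else 0 := by
  have hget : ∀ (n : Nat) (hn : n < cl.length), PySem.List.pyGetD cl (n : Int) "" = cl[n]'hn := by
    intro n hn
    rw [PySem.List.pyGetD_natCast]
    exact List.getD_eq_getElem cl "" hn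
  by_cases hchk : zhongsan_check_in_number ("", value) k = true
  · rw [if_pos hchk]
    -- both sides count the positions of cl holding k, as lengths of filters of nodup lists
    have hfst : (PySem.List.enumerate cl 0).map (fun p => p.1) = PySem.List.pyRange 0 cl.length 1 := by
      simpa using PySem.List.map_fst_enumerate cl 0
    have hnd2 : ((PySem.List.enumerate cl 0).map (fun p => p.1)).Nodup :=
      (List.pairwise_map.2 (PySem.List.pairwise_lt_enumerate cl 0)).imp (fun h => ne_of_lt h)
    have hperm : ((zsMatched (zsIndex cl) value).filter (fun i => PySem.List.pyGetD cl i "" == k)).Perm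
        (((PySem.List.enumerate cl 0).map (fun p => p.1)).filter (fun i => PySem.List.pyGetD cl i "" == k)) := by
      apply (List.perm_ext_iff_of_nodup (List.Nodup.filter _ (nodup_zsMatched _ _))
        (List.Nodup.filter _ hnd2)).2
      intro i
      simp only [List.mem_filter, beq_iff_eq, hfst, PySem.List.mem_pyRange_one]
      constructor
      · rintro ⟨hm, hp⟩
        rcases (mem_zsMatched cl value i).1 hm with ⟨n, hn, rfl, _⟩
        exact ⟨⟨by positivity, by exact_mod_cast hn⟩, hp⟩
      · rintro ⟨⟨h0, hlen⟩, hp⟩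
        refine ⟨?_, hp⟩
        obtain ⟨n, rfl⟩ : ∃ n : Nat, i = (n : Int) := ⟨i.toNat, by omega⟩
        have hn : n < cl.length := by exact_mod_cast hlen
        refine (mem_zsMatched cl value _).2 ⟨n, hn, rfl, ?_⟩
        have : cl[n] = k := by rw [← hget n hn]; exact hp
        rw [this]; exact hchk
    rw [List.countP_eq_length_filter, hperm.length_eq, ← List.countP_eq_length_filter,
      List.countP_map]
    have h2 : (PySem.List.enumerate cl 0).countP ((fun i => PySem.List.pyGetD cl i "" == k) ∘ fun p => p.1)
        = (PySem.List.enumerate cl 0).countP ((fun s => s == k) ∘ fun p => p.2) := by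
      apply List.countP_congr
      intro p hp
      rcases (PySem.List.mem_enumerate_iff _ _ _).1 hp with ⟨n, hn, rfl⟩
      simp [Function.comp, hget n hn]
    rw [h2, ← List.countP_map, PySem.List.map_snd_enumerate]
    rfl
  · rw [if_neg hchk]
    apply List.countP_eq_zero.2
    intro i hi
    rcases (mem_zsMatched cl value i).1 hi with ⟨n, hn, rfl, hq⟩
    simp only [hget n hn, beq_iff_eq]
    intro hk
    exact hchk (hk ▸ hq)

-- getD and keys through B's outer fold over the values
lemma b_outer (values : List String) (cl : List String) (rep : PySem.Dict String Int)
    (hcl : ∀ x ∈ cl, x ∈ rep.keys) (k : String) :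
    (values.foldl (fun rep v => zsBump cl rep (zsMatched (zsIndex cl) v)) rep).getD k 0
        = rep.getD k 0
          + (values.map (fun v =>
              if zhongsan_check_in_number ("", v) k then (cl.count k : Int) else 0)).sum
      ∧ (values.foldl (fun rep v => zsBump cl rep (zsMatched (zsIndex cl) v)) rep).keys = rep.keys := by
  induction values generalizing rep with
  | nil => simp
  | cons v vs ih =>
    simp only [List.foldl_cons, List.map_cons, List.sum_cons]
    have hsub : ∀ i ∈ zsMatched (zsIndex cl) v, PySem.List.pyGetD cl i "" ∈ rep.keys := by
      intro i hi
      rcases (mem_zsMatched cl v i).1 hi with ⟨n, hn, rfl, _⟩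
      rw [PySem.List.pyGetD_natCast, List.getD_eq_getElem cl "" hn]
      exact hcl _ (List.getElem_mem hn)
    have hkeys := keys_zsBump cl _ rep hsub
    have hcl' : ∀ x ∈ cl, x ∈ (zsBump cl rep (zsMatched (zsIndex cl) v)).keys := by
      intro x hx; rw [hkeys]; exact hcl x hx
    obtain ⟨h1, h2⟩ := ih _ hcl'
    refine ⟨?_, by rw [h2, hkeys]⟩
    rw [h1, getD_zsBump cl _ (nodup_zsMatched _ _), countP_zsMatched]
    split_ifs with hc
    · ring
    · simp only [Nat.cast_zero, add_zero, zero_add]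

-- A's per-item check only reads the value component of the item
lemma check_snd (item : String × String) (reg : String) :
    zhongsan_check_in_number item reg = zhongsan_check_in_number ("", item.2) reg := rfl

-- the two pipelines agree for any effective check list cl
lemma zs_main (lst : List (String × String)) (cl : List String) :
    ((PySem.Dict.ofList lst).items.foldl
        (fun d item => cl.foldl (fun d cr => if zhongsan_check_in_number item cr then d.modify cr 0 (· + 1) else d) d)
        (cl.foldl (fun d r => d.insert r 0) PySem.Dict.empty)).items
    = ((PySem.Dict.ofList lst).values.foldl
        (fun rep v => zsBump cl rep (zsMatched (zsIndex cl) v))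
        (cl.foldl (fun d r => d.insert r 0) PySem.Dict.empty)).items := by
  have hk0 : (cl.foldl (fun d r => d.insert r 0) (PySem.Dict.empty : PySem.Dict String Int)).keys
      = PySem.Set.ofList cl := by
    rw [PySem.Dict.keys_foldl_insert cl (fun _ _ => 0), PySem.Dict.keys_empty,
      PySem.Set.update_nil_left]
  have hcont : ∀ x ∈ cl,
      (cl.foldl (fun d r => d.insert r 0) (PySem.Dict.empty : PySem.Dict String Int)).contains x = true := by
    intro x hx
    rw [PySem.Dict.contains_iff_mem_keys, hk0]
    exact (PySem.Set.mem_ofList _ _).2 hx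
  have hmem : ∀ x ∈ cl,
      x ∈ (cl.foldl (fun d r => d.insert r 0) (PySem.Dict.empty : PySem.Dict String Int)).keys := by
    intro x hx; rw [hk0]; exact (PySem.Set.mem_ofList _ _).2 hx
  have hb := fun k => b_outer (PySem.Dict.ofList lst).values cl _ hmem k
  have hkA := outer_keys (PySem.Dict.ofList lst).items cl _ hcont
  have hkB := (hb "").2
  have hndA : ((PySem.Dict.ofList lst).items.foldl
      (fun d item => cl.foldl (fun d cr => if zhongsan_check_in_number item cr then d.modify cr 0 (· + 1) else d) d)
      (cl.foldl (fun d r => d.insert r 0) (PySem.Dict.empty : PySem.Dict String Int))).keys.Nodup := by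
    rw [hkA, hk0]; exact PySem.Set.nodup_ofList cl
  have hndB : ((PySem.Dict.ofList lst).values.foldl
      (fun rep v => zsBump cl rep (zsMatched (zsIndex cl) v))
      (cl.foldl (fun d r => d.insert r 0) (PySem.Dict.empty : PySem.Dict String Int))).keys.Nodup := by
    rw [hkB, hk0]; exact PySem.Set.nodup_ofList cl
  rw [PySem.Dict.items_eq_map_keys _ hndA 0, PySem.Dict.items_eq_map_keys _ hndB 0,
    hkA, hkB, hk0]
  apply List.map_congr_left
  intro k hk
  have hkcl : k ∈ cl := (PySem.Set.mem_ofList _ _).1 hk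
  refine Prod.ext rfl ?_
  simp only
  rw [outer_getD _ cl _ k hcont, (hb k).1,
    getD_init cl PySem.Dict.empty k (by simp [PySem.Dict.getD_empty])]
  -- the per-item 0/1-weighted count times count(cl,k) equals the sum of per-item if-counts
  have hsum : ((PySem.Dict.ofList lst).values.map (fun v =>
        if zhongsan_check_in_number ("", v) k then (cl.count k : Int) else 0)).sum
      = (cl.count k : Int) * ((PySem.Dict.ofList lst).items.countP (fun it => zhongsan_check_in_number it k) : Int) := by
    show (((PySem.Dict.ofList lst).items.map (fun p => p.2)).map _).sum = _
    rw [List.map_map]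
    induction (PySem.Dict.ofList lst).items with
    | nil => simp
    | cons it its ih =>
      simp only [List.map_cons, List.sum_cons, List.countP_cons, ih, Function.comp]
      rw [check_snd it k]
      by_cases hc : zhongsan_check_in_number ("", it.2) k = true
      · simp only [hc]
        push_cast; ring
      · have hd : zhongsan_check_in_number ("", it.2) k = false := by simpa using hc
        simp only [hd, Bool.false_eq_true]
        push_cast; ring
  rw [hsum]

-- ===== VERDICT (by name: the statement is the Claim_ definition above) =====
theorem zhongsan_regular_spec : Claim_equal_zhongsan_regular := by
  intro lst check_list _
  unfold Spec_zhongsan_regular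
  cases check_list with
  | none =>
    simp only [zhongsan_regular, zhongsan_regular_alt]
    exact zs_main lst zsDefault
  | some l =>
    by_cases hl : l = []
    · subst hl
      simp only [zhongsan_regular, zhongsan_regular_alt]
      exact zs_main lst zsDefault
    · simp only [zhongsan_regular, zhongsan_regular_alt, if_neg hl]
      exact zs_main lst l
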